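-- pv_equiv track=rewrite | github.com/hwanseung2/daily-solved | programmers/2022_KAKAO_TECH_INTERNSHIP/행렬과연산.py | solution
-- ===== SOURCE A (Python) =====
-- from collections import deque
-- from collections import deque
--
-- def solution(rc, operations):
--     n, m = len(rc), len(rc[0])
--     rows = deque(deque(row[1:-1]) for row in rc)
--     out_cols = [deque(rc[r][0] for r in range(n)), deque(rc[r][m-1] for r in range(n))]
--
--     for operation in operations:
--         if operation[0] == "S":
--             rows.appendleft(rows.pop())
--             out_cols[0].appendleft(out_cols[0].pop())
--             out_cols[1].appendleft(out_cols[1].pop())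
--
--         else:
--             rows[n-1].append(out_cols[1].pop())
--             out_cols[0].append(rows[n-1].popleft())
--             rows[0].appendleft(out_cols[0].popleft())
--             out_cols[1].appendleft(rows[0].pop())
--
--     answer = []
--     for i in range(n):
--         answer.append([])
--         answer[i].append(out_cols[0][i])
--         answer[i].extend(rows[i])
--         answer[i].append(out_cols[1][i])
--     return answer
-- ===== SOURCE B (Python) =====
-- def _cell(g, n, m, i, j):
--     if i == 0:
--         return g[1][0] if j == 0 else g[0][j - 1]
--     if i == n - 1:
--         return g[n - 2][m - 1] if j == m - 1 else g[n - 1][j + 1]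
--     if j == 0:
--         return g[i + 1][0]
--     if j == m - 1:
--         return g[i - 1][m - 1]
--     return g[i][j]
--
-- def solution(rc, operations):
--     grid = [list(row) for row in rc]
--     n, m = len(grid), len(grid[0])
--     for op in operations:
--         if op[0] == 'S':
--             grid = [grid[-1]] + grid[:-1]
--         else:
--             g = grid
--             grid = [[_cell(g, n, m, i, j) for j in range(m)] for i in range(n)]
--     return grid
-- ===== Notes on version B (the rewrite author's own statement) =====
-- stated objective: alternative
-- what changed: A shuffles a deque-of-deques of row interiors plus two detached boundary-column deques with O(1) splice tricks; B simulates the operations directly on the whole matrix (row cycle for ShiftRow, a per-cell clockwise ring-rotation formula for Rotate).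
-- outside the precondition, e.g. on solution([[1], [2]], []): A returns [[1, 1], [2, 2]], B returns [[1], [2]]; on solution([[1, 2], [3, 4, 5]], []): A returns [[1, 2], [3, 4, 4]], B returns [[1, 2], [3, 4, 5]]; on solution([[1, 2, 3]], ['R']): A returns [[2, 1, 3]], B raises IndexError
import Mathlib
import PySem

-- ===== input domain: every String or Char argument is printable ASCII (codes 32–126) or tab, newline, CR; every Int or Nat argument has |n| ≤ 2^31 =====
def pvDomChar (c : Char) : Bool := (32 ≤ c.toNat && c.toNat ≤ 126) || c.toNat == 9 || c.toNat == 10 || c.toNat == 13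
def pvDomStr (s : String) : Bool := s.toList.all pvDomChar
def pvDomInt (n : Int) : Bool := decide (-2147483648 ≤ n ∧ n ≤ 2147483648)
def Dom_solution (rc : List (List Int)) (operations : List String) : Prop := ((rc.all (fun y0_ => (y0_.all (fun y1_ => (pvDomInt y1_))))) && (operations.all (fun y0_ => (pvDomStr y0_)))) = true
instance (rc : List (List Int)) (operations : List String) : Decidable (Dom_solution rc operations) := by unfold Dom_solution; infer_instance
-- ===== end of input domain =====

-- B replaces A's deque-splicing state (row interiors plus two detached boundary-column
-- deques) by a direct simulation on the whole matrix (row cycle for ShiftRow, per-cell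
-- clockwise ring rotation for Rotate); objective: alternative, not faster.

-- ===== PORT A =====
-- A keeps state (row interiors, out_cols[0], out_cols[1]).  The deque mutations of the
-- Rotate branch are transcribed in order; the in-place updates of rows[n-1] and rows[0]
-- become the reconstruction `first :: middle ++ [last]`, exact for n ≥ 2 (Pre_).
def rotA (rows : List (List Int)) (c0 c1 : List Int) :
    List (List Int) × List Int × List Int :=
  -- rows[n-1].append(out_cols[1].pop())
  let lastRow := rows.getLastD [] ++ [c1.getLastD 0]
  let c1 := c1.dropLast
  -- out_cols[0].append(rows[n-1].popleft())
  let c0 := c0 ++ [lastRow.headD 0]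
  let lastRow := lastRow.tail
  -- rows[0].appendleft(out_cols[0].popleft())
  let firstRow := c0.headD 0 :: rows.headD []
  let c0 := c0.tail
  -- out_cols[1].appendleft(rows[0].pop())
  let c1 := firstRow.getLastD 0 :: c1
  let firstRow := firstRow.dropLast
  (firstRow :: rows.tail.dropLast ++ [lastRow], c0, c1)

def stepA (st : List (List Int) × List Int × List Int) (op : String) :
    List (List Int) × List Int × List Int :=
  if op.toList.headD ' ' = 'S' then  -- operation[0] == "S" (op ≠ "" by Pre_)
    (st.1.getLastD [] :: st.1.dropLast,
     st.2.1.getLastD 0 :: st.2.1.dropLast,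
     st.2.2.getLastD 0 :: st.2.2.dropLast)
  else
    rotA st.1 st.2.1 st.2.2

def solution (rc : List (List Int)) (operations : List String) : List (List Int) :=
  let n := rc.length
  let m := (rc.headD []).length
  let rows := rc.map (fun row => PySem.List.slice row (some 1) (some (-1)))  -- row[1:-1]
  let c0 := rc.map (fun row => PySem.List.pyGetD row 0 0)               -- rc[r][0] (in range by Pre_)
  let c1 := rc.map (fun row => PySem.List.pyGetD row ((m : Int) - 1) 0) -- rc[r][m-1] (in range by Pre_)
  let st := operations.foldl stepA (rows, c0, c1)
  (List.range n).map (fun i => (st.2.1.getD i 0 :: st.1.getD i []) ++ [st.2.2.getD i 0])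

-- ===== PORT B =====
-- B's per-cell clockwise ring-rotation value (all indices in range under Pre_; getD
-- transcribes Python's plain indexing there).
def cellB (g : List (List Int)) (n m i j : Nat) : Int :=
  if i = 0 then
    if j = 0 then (g.getD 1 []).getD 0 0 else (g.getD 0 []).getD (j - 1) 0
  else if i = n - 1 then
    if j = m - 1 then (g.getD (n - 2) []).getD (m - 1) 0 else (g.getD (n - 1) []).getD (j + 1) 0
  else if j = 0 then (g.getD (i + 1) []).getD 0 0
  else if j = m - 1 then (g.getD (i - 1) []).getD (m - 1) 0
  else (g.getD i []).getD j 0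

def rotB (g : List (List Int)) (n m : Nat) : List (List Int) :=
  (List.range n).map (fun i => (List.range m).map (fun j => cellB g n m i j))

def stepB (n m : Nat) (g : List (List Int)) (op : String) : List (List Int) :=
  if op.toList.headD ' ' = 'S' then g.getLastD [] :: g.dropLast  -- [grid[-1]] + grid[:-1]
  else rotB g n m

def solution_alt (rc : List (List Int)) (operations : List String) : List (List Int) :=
  let grid := rc.map (fun row => row)   -- [list(row) for row in rc]
  let n := grid.length
  let m := (grid.headD []).length
  operations.foldl (stepB n m) grid

-- ===== PRECONDITION & SPEC =====
-- Pre_ is the problem's natural domain (a rectangular matrix with ≥ 2 rows and ≥ 2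
-- columns, non-empty operation strings).  Excluded inputs on which A still returns a
-- value: one-column and ragged inputs, where A's answer (a duplicated resp. truncated
-- column) is an artefact of its separated-boundary-columns representation; elsewhere A
-- raises (empty rc / empty row / empty operation string / rows shorter than row 0) or
-- B raises (single-row matrices with a Rotate operation).
def Pre_solution (rc : List (List Int)) (operations : List String) : Prop :=
  2 ≤ rc.length ∧ 2 ≤ (rc.headD []).length ∧
  (∀ row ∈ rc, row.length = (rc.headD []).length) ∧
  (∀ op ∈ operations, op ≠ "")
instance (rc : List (List Int)) (operations : List String) : Decidable (Pre_solution rc operations) := by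
  unfold Pre_solution; infer_instance

def pvWitness_solution : List (List Int) × List String :=
  ([[1, 2, 3], [4, 5, 6], [7, 8, 9]], ["S", "Rotate"])

def Spec_solution (rc : List (List Int)) (operations : List String) (out : List (List Int)) : Prop := out = solution_alt rc operations
instance (rc : List (List Int)) (operations : List String) (out : List (List Int)) : Decidable (Spec_solution rc operations out) := by unfold Spec_solution; infer_instance

-- ===== CLAIM (what is proved, stated in full; the proofs are below) =====
def Claim_equal_solution : Prop := ∀ (rc : List (List Int)) (operations : List String), Dom_solution rc operations → Pre_solution rc operations → Spec_solution rc operations (solution rc operations)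

-- ===== LEMMAS AND PROOFS =====

def innA (r : List Int) : List Int := r.tail.dropLast
def hdA (r : List Int) : Int := r.headD 0
def lsA (r : List Int) : Int := r.getLastD 0

theorem innA_length (r : List Int) : (innA r).length = r.length - 2 := by
  simp [innA]; omega

theorem innA_getElem (r : List Int) (k : Nat) (h : k < (innA r).length) :
    (innA r)[k] = r[k+1]'(by simp [innA] at h; omega) := by
  simp [innA, List.getElem_dropLast, List.getElem_tail]

theorem hdA_getElem (r : List Int) (h : 0 < r.length) : hdA r = r[0] := by
  cases r with
  | nil => simp at h
  | cons a t => simp [hdA]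

theorem lsA_getElem (r : List Int) (h : 0 < r.length) : lsA r = r[r.length - 1] := by
  simp [lsA, List.getLastD_eq_getLast?, List.getLast?_eq_getElem?]
  rw [List.getElem?_eq_getElem (by omega)]
  rfl

theorem lsA_getElem' (r : List Int) (m : Nat) (h : r.length = m) (hm : 0 < m) :
    lsA r = r[m - 1]'(by omega) := by
  rw [lsA_getElem r (by omega)]
  congr 1
  omega

theorem tail_eq_innA (r : List Int) (h : 2 ≤ r.length) : innA r ++ [lsA r] = r.tail := by
  cases r with
  | nil => simp at h
  | cons a t =>
    have ht : t ≠ [] := by intro e; subst e; simp at h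
    simp only [innA, lsA, List.tail_cons, List.getLastD_cons]
    rw [List.getLastD_eq_getLast?, List.getLast?_eq_some_getLast ht]
    simpa using List.dropLast_append_getLast ht

theorem dropLast_eq_innA (r : List Int) (h : 2 ≤ r.length) : hdA r :: innA r = r.dropLast := by
  match r, h with
  | a :: b :: t, _ => simp [hdA, innA]

theorem recon_innA (r : List Int) (h : 2 ≤ r.length) : (hdA r :: innA r) ++ [lsA r] = r := by
  have hr : r ≠ [] := by intro e; subst e; simp at h
  rw [dropLast_eq_innA r h, lsA]
  rw [List.getLastD_eq_getLast?, List.getLast?_eq_some_getLast hr]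
  simpa using List.dropLast_append_getLast hr

theorem headD_map_range {α : Type} (f : Nat → α) (m : Nat) (h : 0 < m) (d : α) :
    ((List.range m).map f).headD d = f 0 := by
  cases m with
  | zero => omega
  | succ k => simp [List.range_succ_eq_map]

theorem getLastD_map_range {α : Type} (f : Nat → α) (m : Nat) (h : 0 < m) (d : α) :
    ((List.range m).map f).getLastD d = f (m - 1) := by
  cases m with
  | zero => omega
  | succ k => simp [List.range_succ]

theorem innA_map_range (f : Nat → Int) (m : Nat) :
    innA ((List.range m).map f) = (List.range (m - 2)).map (fun k => f (k + 1)) := by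
  apply List.ext_getElem
  · simp [innA_length]
  · intro k h1 h2
    rw [innA_getElem]
    simp

theorem getDD (M : List (List Int)) {n m : Nat} (hlen : M.length = n)
    (hrow : ∀ row ∈ M, row.length = m) (i j : Nat) (hi : i < n) (hj : j < m) :
    (M.getD i []).getD j 0 = (M[i]'(by omega))[j]'(by
      have := hrow (M[i]'(by omega)) (List.getElem_mem (by omega)); omega) := by
  rw [List.getD_eq_getElem _ _ (by omega : i < M.length)]
  rw [List.getD_eq_getElem]

theorem getLastD_map' {α β : Type} (f : α → β) (l : List α) (h : l ≠ []) (d : β) :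
    (l.map f).getLastD d = f (l.getLast h) := by
  rw [List.getLastD_eq_getLast?, List.getLast?_map, List.getLast?_eq_some_getLast h]
  rfl

theorem rot_hd {n m : Nat} (M : List (List Int)) (hm : 2 ≤ m) :
    (rotB M n m).map hdA = (List.range n).map (fun i => cellB M n m i 0) := by
  simp only [rotB, List.map_map]
  apply List.map_congr_left
  intro i hi
  simp only [Function.comp]
  exact headD_map_range _ m (by omega) 0

theorem rot_ls {n m : Nat} (M : List (List Int)) (hm : 2 ≤ m) :
    (rotB M n m).map lsA = (List.range n).map (fun i => cellB M n m i (m - 1)) := by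
  simp only [rotB, List.map_map]
  apply List.map_congr_left
  intro i hi
  simp only [Function.comp]
  exact getLastD_map_range _ m (by omega) 0

theorem rot_inn {n m : Nat} (M : List (List Int)) :
    (rotB M n m).map innA = (List.range n).map (fun i => (List.range (m - 2)).map (fun k => cellB M n m i (k + 1))) := by
  simp only [rotB, List.map_map]
  apply List.map_congr_left
  intro i hi
  simp only [Function.comp]
  exact innA_map_range _ m

theorem headD_map' {α β : Type} (f : α → β) (l : List α) (h : l ≠ []) (d : β) :
    (l.map f).headD d = f (l.head h) := by
  rw [List.headD_eq_head?_getD, List.head?_map, List.head?_eq_some_head h]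
  rfl

theorem rot_comm {n m : Nat} {M : List (List Int)} (hn : 2 ≤ n) (hm : 2 ≤ m)
    (hlen : M.length = n) (hrow : ∀ row ∈ M, row.length = m) :
    rotA (M.map innA) (M.map hdA) (M.map lsA) =
      ((rotB M n m).map innA, (rotB M n m).map hdA, (rotB M n m).map lsA) := by
  have hMne : M ≠ [] := by intro e; subst e; simp at hlen; omega
  have hmapne : M.map innA ≠ [] := by simp [hMne]
  have hrl : ∀ (i : Nat) (h : i < M.length), (M[i]'h).length = m :=
    fun i h => hrow _ (List.getElem_mem h)
  have hn1 : n - 1 < M.length := by omega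
  have h0 : 0 < M.length := by omega
  have hlast : M.getLast hMne = M[n-1]'hn1 := by
    rw [List.getLast_eq_getElem]; congr 1; omega
  have hhead : M.head hMne = M[0]'h0 := by rw [List.head_eq_getElem]
  have hLlen : (M[n-1]'hn1).length = m := hrl _ _
  have hFlen : (M[0]'h0).length = m := hrl _ _
  have eL : (M.map innA).getLastD [] ++ [(M.map lsA).getLastD 0] = (M[n-1]'hn1).tail := by
    rw [getLastD_map' innA M hMne, getLastD_map' lsA M hMne, hlast]
    exact tail_eq_innA _ (by omega)
  have eLh : (M[n-1]'hn1).tail.headD 0 = (M[n-1]'hn1)[1]'(by omega) := by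
    have h' : 0 < (M[n-1]'hn1).tail.length := by simp; omega
    rw [show (M[n-1]'hn1).tail.headD 0 = hdA ((M[n-1]'hn1).tail) from rfl, hdA_getElem _ h']
    simp [List.getElem_tail]
  have headD_append' : ∀ (l l' : List Int) (d : Int), l ≠ [] → (l ++ l').headD d = l.headD d := by
    intro l l' d hl; cases l with | nil => exact absurd rfl hl | cons a t => simp
  have ec0h : ∀ (x : Int), (M.map hdA ++ [x]).headD 0 = hdA (M[0]'h0) := by
    intro x
    rw [headD_append' _ _ _ (by simp [hMne]), headD_map' hdA M hMne, hhead]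
  have efr : hdA (M[0]'h0) :: (M.map innA).headD [] = (M[0]'h0).dropLast := by
    rw [headD_map' innA M hMne, hhead]
    exact dropLast_eq_innA _ (by omega)
  have efl : (M[0]'h0).dropLast.getLastD 0 = (M[0]'h0)[m-2]'(by omega) := by
    rw [show (M[0]'h0).dropLast.getLastD 0 = lsA ((M[0]'h0).dropLast) from rfl,
        lsA_getElem _ (by simp [hFlen]; omega), List.getElem_dropLast]
    congr 1
    simp [hFlen]
    omega
  simp only [rotA]
  rw [eL, eLh, ec0h, efr, efl]
  simp only [Prod.mk.injEq]
  refine ⟨?_, ?_, ?_⟩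
  · -- rows component
    rw [rot_inn M]
    apply List.ext_getElem
    · simp; omega
    · intro i h1 h2
      have hi : i < n := by simpa using h2
      rw [List.getElem_map, List.getElem_range]
      by_cases hin : i = n - 1
      · rw [List.getElem_append_right (by simp; omega), List.getElem_singleton]
        simp only [hin]
        apply List.ext_getElem
        · simp [hLlen]; omega
        · intro k k1 k2
          have hk : k < m - 2 := by simpa using k2
          rw [List.getElem_tail, List.getElem_tail]
          rw [List.getElem_map, List.getElem_range]
          simp only [cellB]
          split_ifs <;> try (exfalso; omega)
          all_goals rw [getDD M hlen hrow] <;> try omega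
      · rw [List.getElem_append_left (by simp; omega)]
        cases i with
        | zero =>
          rw [List.getElem_cons_zero]
          apply List.ext_getElem
          · simp [hFlen]; omega
          · intro k k1 k2
            have hk : k < m - 2 := by simpa using k2
            rw [List.getElem_dropLast, List.getElem_dropLast]
            rw [List.getElem_map, List.getElem_range]
            simp only [cellB]
            split_ifs <;> try (exfalso; omega)
            all_goals rw [getDD M hlen hrow] <;> try omega
            all_goals rfl
        | succ i' =>
          rw [List.getElem_cons_succ]
          rw [List.getElem_dropLast, List.getElem_tail, List.getElem_map]
          have hilen : (M[i'+1]'(by omega)).length = m := hrl _ (by omega)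
          apply List.ext_getElem
          · simp [innA_length, hilen]
          · intro k k1 k2
            have hk : k < m - 2 := by simpa using k2
            rw [innA_getElem]
            rw [List.getElem_map, List.getElem_range]
            simp only [cellB]
            split_ifs <;> try (exfalso; omega)
            all_goals rw [getDD M hlen hrow] <;> try omega
  · -- c0 component
    rw [rot_hd M hm]
    apply List.ext_getElem
    · simp; omega
    · intro i h1 h2
      have hi : i < n := by simpa using h2
      rw [List.getElem_tail, List.getElem_map, List.getElem_range]
      by_cases hin : i = n - 1
      · rw [List.getElem_append_right (by simp; omega), List.getElem_singleton]
        simp only [hin]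
        simp only [cellB]
        split_ifs <;> try (exfalso; omega)
        all_goals rw [getDD M hlen hrow] <;> try omega
      · rw [List.getElem_append_left (by simp; omega), List.getElem_map]
        rw [hdA_getElem _ (by rw [hrl]; omega)]
        by_cases hi0 : i = 0
        · simp only [hi0]
          simp only [cellB]
          split_ifs <;> try (exfalso; omega)
          all_goals rw [getDD M hlen hrow] <;> try omega
        · simp only [cellB]
          split_ifs <;> try (exfalso; omega)
          all_goals rw [getDD M hlen hrow] <;> try omega
  · -- c1 component
    rw [rot_ls M hm]
    apply List.ext_getElem
    · simp; omega
    · intro i h1 h2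
      have hi : i < n := by simpa using h2
      rw [List.getElem_map, List.getElem_range]
      cases i with
      | zero =>
        rw [List.getElem_cons_zero]
        simp only [cellB]
        split_ifs <;> try (exfalso; omega)
        all_goals rw [getDD M hlen hrow] <;> try omega
        all_goals rfl
      | succ i' =>
        rw [List.getElem_cons_succ]
        rw [List.getElem_dropLast, List.getElem_map]
        rw [lsA_getElem' (M[i']'(by omega : i' < M.length)) m (hrl i' (by omega)) (by omega)]
        by_cases hin : i' + 1 = n - 1
        · have hi2 : i' = n - 2 := by omega
          subst hi2
          simp only [hin]
          simp only [cellB]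
          split_ifs <;> try (exfalso; omega)
          all_goals rw [getDD M hlen hrow] <;> try omega
        · simp only [cellB]
          split_ifs <;> try (exfalso; omega)
          all_goals rw [getDD M hlen hrow] <;> try omega
          all_goals rfl

def Rect (n m : Nat) (M : List (List Int)) : Prop :=
  M.length = n ∧ ∀ row ∈ M, row.length = m

theorem shift_comm {β : Type} (f : List Int → β) (dA : β) (M : List (List Int)) (h : M ≠ []) :
    (M.map f).getLastD dA :: (M.map f).dropLast = (M.getLastD [] :: M.dropLast).map f := by
  rw [getLastD_map' f M h, List.map_cons, List.map_dropLast]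
  congr 2
  rw [List.getLastD_eq_getLast?, List.getLast?_eq_some_getLast h]
  rfl

theorem fold_comm (n m : Nat) (hn : 2 ≤ n) (hm : 2 ≤ m) (ops : List String) :
    ∀ M : List (List Int), Rect n m M →
      ops.foldl stepA (M.map innA, M.map hdA, M.map lsA) =
        ((ops.foldl (stepB n m) M).map innA, (ops.foldl (stepB n m) M).map hdA,
         (ops.foldl (stepB n m) M).map lsA) ∧ Rect n m (ops.foldl (stepB n m) M) := by
  induction ops with
  | nil => exact fun M hM => ⟨rfl, hM⟩
  | cons op ops ih =>
    intro M hM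
    have hMne : M ≠ [] := by
      intro e; subst e
      have := hM.1; simp at this; omega
    have hstep : stepA (M.map innA, M.map hdA, M.map lsA) op =
        ((stepB n m M op).map innA, (stepB n m M op).map hdA, (stepB n m M op).map lsA) := by
      by_cases hS : op.toList.headD ' ' = 'S'
      · simp only [stepA, stepB, if_pos hS]
        exact Prod.ext (shift_comm innA [] M hMne)
          (Prod.ext (shift_comm hdA 0 M hMne) (shift_comm lsA 0 M hMne))
      · simp only [stepA, stepB, if_neg hS]
        exact rot_comm hn hm hM.1 hM.2
    have hrect : Rect n m (stepB n m M op) := by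
      by_cases hS : op.toList.headD ' ' = 'S'
      · simp only [stepB, if_pos hS]
        constructor
        · have := hM.1; simp; omega
        · intro row hr
          rcases List.mem_cons.mp hr with h | h
          · subst h
            rw [List.getLastD_eq_getLast?, List.getLast?_eq_some_getLast hMne, Option.getD_some]
            exact hM.2 _ (List.getLast_mem hMne)
          · exact hM.2 _ ((List.dropLast_sublist M).subset h)
      · simp only [stepB, if_neg hS]
        constructor
        · simp [rotB]
        · intro row hr
          simp only [rotB, List.mem_map] at hr
          obtain ⟨i, hi, rfl⟩ := hr
          simp
    rw [List.foldl_cons, List.foldl_cons, hstep]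
    exact ih _ hrect

theorem recon_map (G : List (List Int)) (n m : Nat) (hm : 2 ≤ m) (hR : Rect n m G) :
    (List.range n).map (fun i =>
      ((G.map hdA).getD i 0 :: (G.map innA).getD i []) ++ [(G.map lsA).getD i 0]) = G := by
  apply List.ext_getElem
  · simp [hR.1]
  · intro i h1 h2
    have hi : i < G.length := h2
    have hin : i < n := by rw [hR.1] at hi; exact hi
    rw [List.getElem_map, List.getElem_range]
    rw [List.getD_eq_getElem _ _ (by simpa using hi), List.getElem_map]
    rw [List.getD_eq_getElem _ _ (by simpa using hi), List.getElem_map]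
    rw [List.getD_eq_getElem _ _ (by simpa using hi), List.getElem_map]
    exact recon_innA _ (by rw [hR.2 _ (List.getElem_mem hi)]; omega)

-- initial-state bridges (A's Python slicing/indexing vs the abstraction)
theorem slice_1_neg1 (r : List Int) : PySem.List.slice r (some 1) (some (-1)) = innA r := by
  cases r with
  | nil => rfl
  | cons a t =>
    simp only [PySem.List.slice, PySem.List.clampIdx, innA]
    simp [List.dropLast_eq_take]
    rw [if_neg (by omega : ¬((t.length : Int) < 0))]
    omega

theorem pyGetD_zero (r : List Int) : PySem.List.pyGetD r 0 0 = hdA r := by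
  cases r <;> simp [pysem, hdA]

theorem pyGetD_last (r : List Int) (m : Nat) (h : r.length = m) (hm : 2 ≤ m) :
    PySem.List.pyGetD r ((m : Int) - 1) 0 = lsA r := by
  have e : ((m : Int) - 1) = ((m - 1 : Nat) : Int) := by omega
  rw [e, PySem.List.pyGetD_natCast, ← h, lsA]
  simp [List.getLastD_eq_getLast?, List.getLast?_eq_getElem?, List.getD_eq_getElem?_getD]

-- ===== VERDICT (by name: the statement is the Claim_ definition above) =====
theorem solution_spec : Claim_equal_solution := by
  unfold Claim_equal_solution
  intro rc ops _ hpre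
  obtain ⟨hn, hm, hrow, _⟩ := hpre
  unfold Spec_solution solution solution_alt
  simp only [List.map_id']
  rw [List.map_congr_left (fun row _ => slice_1_neg1 row),
      List.map_congr_left (fun row _ => pyGetD_zero row),
      List.map_congr_left (fun row hr => pyGetD_last row _ (hrow row hr) hm)]
  obtain ⟨hfold, hrect⟩ :=
    fold_comm rc.length (rc.headD []).length hn hm ops rc ⟨rfl, hrow⟩
  rw [hfold]
  exact recon_map _ _ _ hm hrect
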